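-- pv_equiv track=rewrite | github.com/YunTianZhou/LeetcodeContest | Biweekly Contest 160/3605. Minimum Stability Factor of Array.py | minStable
-- ===== SOURCE A (Python) =====
-- from typing import List
-- from math import gcd
--
-- class SparseTable:
--     def __init__(self, data):
--         self.n = len(data)
--         self.log = [0] * (self.n + 1)
--         for i in range(2, self.n + 1):
--             self.log[i] = self.log[i // 2] + 1
--
--         k = self.log[self.n] + 1
--         self.st = [[0] * k for _ in range(self.n)]
--
--         for i in range(self.n):
--             self.st[i][0] = data[i]
--
--         for j in range(1, k):
--             for i in range(self.n - (1 << j) + 1):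
--                 self.st[i][j] = self.combine(self.st[i][j-1], self.st[i + (1 << (j - 1))][j-1])
--
--     def query(self, l, r):
--         j = self.log[r - l + 1]
--         return self.combine(self.st[l][j], self.st[r - (1 << j) + 1][j])
--
--     def combine(self, a, b):
--         return gcd(a, b)
--
-- def minStable(nums: List[int], maxC: int) -> int:
--     n = len(nums)
--     left = 0
--     right = n - 1
--     ans = n
--     st = SparseTable(nums)
--
--     while left <= right:
--         mid = (left + right) // 2
--
--         k = 0
--         prev = 0
--         for i in range(mid, n):
--             if i - prev + 1 <= mid: continue
--             prev = max(prev, i - mid)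
--             if st.query(prev, i) >= 2:
--                 k += 1
--                 prev = i + 1
--                 if k > maxC:
--                     break
--
--         if k <= maxC:
--             ans = mid
--             right = mid - 1
--         else:
--             left = mid + 1
--
--     return ans
-- ===== SOURCE B (Python) =====
-- from typing import List
-- from math import gcd
--
-- def _build(nums, lo, hi):
--     # segment-tree node (value, left, right) for nums[lo:hi); value = gcd of the slice
--     if hi - lo == 1:
--         return (gcd(nums[lo], 0), None, None)
--     mid = (lo + hi) // 2
--     L = _build(nums, lo, mid)
--     R = _build(nums, mid, hi)
--     return (gcd(L[0], R[0]), L, R)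
--
-- def _query(t, lo, hi, l, r):
--     # gcd of nums[l:r), assuming lo <= l < r <= hi; descends the tree
--     if l <= lo and hi <= r:
--         return t[0]
--     mid = (lo + hi) // 2
--     if r <= mid:
--         return _query(t[1], lo, mid, l, r)
--     if mid <= l:
--         return _query(t[2], mid, hi, l, r)
--     return gcd(_query(t[1], lo, mid, l, mid), _query(t[2], mid, hi, mid, r))
--
-- def minStable(nums: List[int], maxC: int) -> int:
--     n = len(nums)
--     ans = n
--     if n == 0:
--         return ans
--     tree = _build(nums, 0, n)
--     left, right = 0, n - 1
--     while left <= right: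
--         mid = (left + right) // 2
--         k = 0
--         end = mid                       # right edge of the current window of size mid+1
--         while end < n:
--             if _query(tree, 0, n, end - mid, end + 1) >= 2:
--                 k += 1
--                 if k > maxC:
--                     break
--                 end += mid + 1          # cut: restart after this window
--             else:
--                 end += 1                # slide the window by one
--         if k <= maxC:
--             ans = mid
--             right = mid - 1
--         else:
--             left = mid + 1
--     return ans
-- ===== Notes on version B (the rewrite author's own statement) =====
-- stated objective: alternative
-- what changed: Replaces the sparse-table (precomputed log/st arrays, two overlapping interval lookups per query) by a recursive segment tree whose query descends and merges tree nodes, and replaces the inner for-loop with its skip-continue/prev bookkeeping by a jumping sliding-window while-loop over the window's right edge.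
import Mathlib
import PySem

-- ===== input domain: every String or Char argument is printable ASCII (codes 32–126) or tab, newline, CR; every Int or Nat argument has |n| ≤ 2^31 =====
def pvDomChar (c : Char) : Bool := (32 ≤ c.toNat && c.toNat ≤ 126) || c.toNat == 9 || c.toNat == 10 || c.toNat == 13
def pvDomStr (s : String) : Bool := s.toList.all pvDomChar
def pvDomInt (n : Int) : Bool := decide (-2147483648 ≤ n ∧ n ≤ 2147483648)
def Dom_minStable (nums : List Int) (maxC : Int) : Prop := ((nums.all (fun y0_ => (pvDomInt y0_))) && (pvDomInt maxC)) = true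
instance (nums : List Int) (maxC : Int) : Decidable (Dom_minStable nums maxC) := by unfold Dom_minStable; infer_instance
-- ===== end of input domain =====

-- B replaces A's sparse table by a recursive segment tree and the skip-laden inner
-- for-loop by a jumping sliding-window while-loop (objective: alternative).

-- ===== PORT A =====

-- math.gcd of two Python ints (always nonnegative)
def pyGcd (a b : Int) : Int := (Int.gcd a b : Int)

-- SparseTable.__init__: the log table (log[i] built by log[i] = log[i//2] + 1)
def buildLog (n : Nat) : List Nat :=
  (List.range' 2 (n - 1)).foldl
    (fun lg i => lg.set i (lg.getD (i / 2) 0 + 1))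
    (List.replicate (n + 1) 0)

-- SparseTable.__init__: k = log[n] + 1, then st[i][0] = data[i], then the level loop
def buildSt (data : List Int) : List (List Int) :=
  let n := data.length
  let k := (buildLog n).getD n 0 + 1
  let st0 := List.replicate n (List.replicate k (0 : Int))
  let st1 := (List.range n).foldl
    (fun st i => st.set i ((st.getD i []).set 0 (data.getD i 0))) st0
  (List.range' 1 (k - 1)).foldl
    (fun st j =>
      (List.range (n + 1 - 2 ^ j)).foldl
        (fun st i =>
          st.set i ((st.getD i []).set j
            (pyGcd ((st.getD i []).getD (j - 1) 0)
                   ((st.getD (i + 2 ^ (j - 1)) []).getD (j - 1) 0))))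
        st)
    st1

-- SparseTable.query
def queryA (logv : List Nat) (st : List (List Int)) (l r : Int) : Int :=
  let j := logv.getD (r - l + 1).toNat 0
  pyGcd ((st.getD l.toNat []).getD j 0)
        ((st.getD (r - (2 ^ j : Nat) + 1).toNat []).getD j 0)

-- the inner `for i in range(mid, n)` loop of minStable (with its continue/break)
def loopA (logv : List Nat) (st : List (List Int)) (n mid maxC : Int)
    (i k prev : Int) : Int :=
  if h : n ≤ i then k
  else if i - prev + 1 ≤ mid then loopA logv st n mid maxC (i + 1) k prev
  else
    let prev' := max prev (i - mid)
    if queryA logv st prev' i ≥ 2 then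
      if k + 1 > maxC then k + 1
      else loopA logv st n mid maxC (i + 1) (k + 1) (i + 1)
    else loopA logv st n mid maxC (i + 1) k prev'
termination_by (n - i).toNat
decreasing_by all_goals omega

-- the outer binary-search `while left <= right` loop
def bsA (logv : List Nat) (st : List (List Int)) (n maxC : Int)
    (left right ans : Int) : Int :=
  if h : right < left then ans
  else
    let mid := PySem.Int.floordiv (left + right) 2
    let k := loopA logv st n mid maxC mid 0 0
    if k ≤ maxC then bsA logv st n maxC left (mid - 1) mid
    else bsA logv st n maxC (mid + 1) right ans
termination_by (right + 1 - left).toNat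
decreasing_by
  all_goals
    (have hb := PySem.Int.floordiv_two_mid_bounds (show left ≤ right by omega); omega)

def minStable (nums : List Int) (maxC : Int) : Int :=
  let n : Int := nums.length
  bsA (buildLog nums.length) (buildSt nums) n maxC 0 (n - 1) n

-- ===== PORT B =====

inductive SegTree where
  | leaf : Int → SegTree
  | node : Int → SegTree → SegTree → SegTree
deriving Repr

def stVal : SegTree → Int
  | .leaf v => v
  | .node v _ _ => v

-- _build: segment tree over nums[lo:hi)
def buildB (nums : List Int) (lo hi : Nat) : SegTree :=
  if _h : hi ≤ lo + 1 then .leaf (pyGcd (nums.getD lo 0) 0)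
  else
    let mid := (lo + hi) / 2
    let L := buildB nums lo mid
    let R := buildB nums mid hi
    .node (pyGcd (stVal L) (stVal R)) L R
termination_by hi - lo
decreasing_by all_goals omega

-- _query: gcd of nums[l:r) by descending the tree
def queryB (t : SegTree) (lo hi l r : Nat) : Int :=
  if l ≤ lo ∧ hi ≤ r then stVal t
  else
    match t with
    | .leaf v => v
    | .node _ L R =>
      let mid := (lo + hi) / 2
      if r ≤ mid then queryB L lo mid l r
      else if mid ≤ l then queryB R mid hi l r
      else pyGcd (queryB L lo mid l mid) (queryB R mid hi mid r)

-- the inner `while end < n` jumping-window loop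
def loopB (tree : SegTree) (n mid : Nat) (maxC : Int) (e : Nat) (k : Int) : Int :=
  if _h : e < n then
    if queryB tree 0 n (e - mid) (e + 1) ≥ 2 then
      if k + 1 > maxC then k + 1
      else loopB tree n mid maxC (e + mid + 1) (k + 1)
    else loopB tree n mid maxC (e + 1) k
  else k
termination_by n - e
decreasing_by all_goals omega

-- the outer `while left <= right` loop
def bsB (tree : SegTree) (n : Nat) (maxC : Int) (left right ans : Int) : Int :=
  if h : right < left then ans
  else
    let mid := PySem.Int.floordiv (left + right) 2
    let k := loopB tree n mid.toNat maxC mid.toNat 0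
    if k ≤ maxC then bsB tree n maxC left (mid - 1) mid
    else bsB tree n maxC (mid + 1) right ans
termination_by (right + 1 - left).toNat
decreasing_by
  all_goals
    (have hb := PySem.Int.floordiv_two_mid_bounds (show left ≤ right by omega); omega)

def minStable_alt (nums : List Int) (maxC : Int) : Int :=
  let n := nums.length
  if n = 0 then (n : Int)
  else bsB (buildB nums 0 n) n maxC 0 ((n : Int) - 1) (n : Int)

-- ===== PRECONDITION & SPEC =====
def Spec_minStable (nums : List Int) (maxC : Int) (out : Int) : Prop := out = minStable_alt nums maxC
instance (nums : List Int) (maxC : Int) (out : Int) : Decidable (Spec_minStable nums maxC out) := by unfold Spec_minStable; infer_instance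

-- ===== CLAIM (what is proved, stated in full; the proofs are below) =====
def Claim_equal_minStable : Prop := ∀ (nums : List Int) (maxC : Int), Dom_minStable nums maxC → Spec_minStable nums maxC (minStable nums maxC)

-- ===== LEMMAS AND PROOFS =====

theorem stVal_leaf (v : Int) : stVal (.leaf v) = v := rfl

theorem stVal_node (v : Int) (L R : SegTree) : stVal (.node v L R) = v := rfl

-- gcd (as a Nat) of the absolute values of a list of ints
def glist (ys : List Int) : Nat := ys.foldr (fun x g => Nat.gcd x.natAbs g) 0

-- gcd of the window nums[l : l+len]
def seg (xs : List Int) (l len : Nat) : Nat := glist ((xs.drop l).take len)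

theorem glist_dvd {ys : List Int} {x : Int} (hx : x ∈ ys) : glist ys ∣ x.natAbs := by
  induction ys with
  | nil => cases hx
  | cons y ys ih =>
    rcases List.mem_cons.mp hx with rfl | hx
    · exact Nat.gcd_dvd_left _ _
    · exact dvd_trans (Nat.gcd_dvd_right _ _) (ih hx)

theorem dvd_glist {ys : List Int} {c : Nat} (h : ∀ x ∈ ys, c ∣ x.natAbs) : c ∣ glist ys := by
  induction ys with
  | nil => exact dvd_zero c
  | cons y ys ih =>
    exact Nat.dvd_gcd (h y (List.mem_cons_self)) (ih fun x hx => h x (List.mem_cons_of_mem _ hx))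

theorem seg_dvd {xs : List Int} {l len t : Nat} (hlen : l + len ≤ xs.length)
    (ht : t < len) : seg xs l len ∣ (xs.getD (l + t) 0).natAbs := by
  have hlt : l + t < xs.length := by omega
  have h1 : t < ((xs.drop l).take len).length := by
    simp [List.length_take, List.length_drop]; omega
  have h2 : ((xs.drop l).take len)[t]'h1 = xs.getD (l + t) 0 := by
    rw [List.getElem_take, List.getElem_drop, List.getD_eq_getElem]
  exact h2 ▸ glist_dvd (List.getElem_mem h1)

theorem dvd_seg {xs : List Int} {l len : Nat} {c : Nat} (_hlen : l + len ≤ xs.length)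
    (h : ∀ t < len, c ∣ (xs.getD (l + t) 0).natAbs) : c ∣ seg xs l len := by
  refine dvd_glist fun x hx => ?_
  obtain ⟨t, ht, rfl⟩ := List.mem_iff_getElem.mp hx
  have ht' : t < len := by
    have := ht; simp [List.length_take, List.length_drop] at this; omega
  have h2 : ((xs.drop l).take len)[t]'ht = xs.getD (l + t) 0 := by
    rw [List.getElem_take, List.getElem_drop, List.getD_eq_getElem]
  exact h2 ▸ h t ht'

-- two covering windows glue to the gcd of the union
theorem seg_glue {xs : List Int} {l m1 l2 m2 len : Nat}
    (h2l : l ≤ l2) (hle : l2 ≤ l + m1) (hm1 : m1 ≤ len) (hcov : l2 + m2 = l + len)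
    (hlen : l + len ≤ xs.length) :
    Nat.gcd (seg xs l m1) (seg xs l2 m2) = seg xs l len := by
  have hl2 : l2 + m2 ≤ xs.length := by omega
  have hm1' : l + m1 ≤ xs.length := by omega
  apply Nat.dvd_antisymm
  · refine dvd_seg hlen fun t ht => ?_
    by_cases hc : t < m1
    · exact dvd_trans (Nat.gcd_dvd_left _ _) (seg_dvd hm1' hc)
    · have h3 : l + t = l2 + (l + t - l2) := by omega
      have h4 : l + t - l2 < m2 := by omega
      rw [h3]
      exact dvd_trans (Nat.gcd_dvd_right _ _) (seg_dvd hl2 h4)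
  · refine Nat.dvd_gcd ?_ ?_
    · exact dvd_seg hm1' fun t ht => seg_dvd hlen (by omega)
    · refine dvd_seg hl2 fun t ht => ?_
      have h3 : l2 + t = l + (l2 + t - l) := by omega
      rw [h3]
      exact seg_dvd hlen (by omega)

theorem seg_one {xs : List Int} {l : Nat} (hl : l < xs.length) :
    seg xs l 1 = (xs.getD l 0).natAbs := by
  have hd : xs.drop l = xs[l] :: xs.drop (l + 1) := List.drop_eq_getElem_cons hl
  rw [List.getD_eq_getElem xs 0 hl]
  simp only [seg, hd, List.take_succ_cons, List.take_zero, glist, List.foldr]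
  exact Nat.gcd_zero_right _

theorem getD_set_self {a : Type} (l : List a) (i : Nat) (v d : a) (h : i < l.length) :
    (l.set i v).getD i d = v := by
  simp [List.getD, h]

theorem getD_set_ne {a : Type} (l : List a) {i j : Nat} (v d : a) (h : i ≠ j) :
    (l.set i v).getD j d = l.getD j d := by
  simp [List.getD, List.getElem?_set_ne h]

-- ===== sparse-table characterisation =====

theorem buildLog_inv (n : Nat) : ∀ m, m ≤ n - 1 →
    (((List.range' 2 m).foldl (fun lg i => lg.set i (lg.getD (i / 2) 0 + 1))
        (List.replicate (n + 1) (0:Nat))).length = n + 1) ∧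
    (∀ i, i ≤ m + 1 → ((List.range' 2 m).foldl (fun lg i => lg.set i (lg.getD (i / 2) 0 + 1))
        (List.replicate (n + 1) (0:Nat))).getD i 0 = Nat.log2 i) ∧
    (∀ i, m + 1 < i → ((List.range' 2 m).foldl (fun lg i => lg.set i (lg.getD (i / 2) 0 + 1))
        (List.replicate (n + 1) (0:Nat))).getD i 0 = 0) := by
  intro m
  induction m with
  | zero =>
    intro _
    refine ⟨by simp, ?_, ?_⟩
    · intro i hi
      interval_cases i <;> simp [List.getD, Nat.log2_def]
    · intro i hi
      simp [List.getD]
  | succ m ih =>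
    intro hm
    obtain ⟨hL, h2, h3⟩ := ih (by omega)
    rw [List.range'_1_concat, List.foldl_append]
    simp only [List.foldl_cons, List.foldl_nil]
    refine ⟨by rw [List.length_set]; exact hL, ?_, ?_⟩
    · intro i hi
      by_cases hi2 : i = 2 + m
      · rw [hi2, getD_set_self _ _ _ _ (by omega)]
        rw [h2 ((2 + m) / 2) (by omega)]
        conv_rhs => rw [Nat.log2_def]
        simp
      · rw [getD_set_ne _ _ _ (fun he => hi2 he.symm)]
        exact h2 i (by omega)
    · intro i hi
      rw [getD_set_ne _ _ _ (by omega)]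
      exact h3 i (by omega)

theorem buildLog_spec (n : Nat) :
    (buildLog n).length = n + 1 ∧ ∀ i ≤ n, (buildLog n).getD i 0 = Nat.log2 i := by
  obtain ⟨hL, h2, _⟩ := buildLog_inv n (n - 1) le_rfl
  exact ⟨hL, fun i hi => h2 i (by omega)⟩

theorem two_pow_pred {j : Nat} (hj : 1 ≤ j) : 2 ^ (j - 1) + 2 ^ (j - 1) = 2 ^ j := by
  obtain ⟨t, rfl⟩ : ∃ t, j = t + 1 := ⟨j - 1, by omega⟩
  rw [Nat.add_sub_cancel, pow_succ]
  omega

theorem pyGcd_def (a b : Int) : pyGcd a b = ((Nat.gcd a.natAbs b.natAbs : Nat) : Int) := rfl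

theorem pyGcd_natCast (x y : Nat) : pyGcd (x : Int) (y : Int) = ((Nat.gcd x y : Nat) : Int) := by
  simp [pyGcd_def]

-- the intended content of cell (i, j) of the sparse table
def target (nums : List Int) (i j : Nat) : Int :=
  if j = 0 then nums.getD i 0 else (seg nums i (2 ^ j) : Int)

-- the three loops of SparseTable.__init__, named for the invariant proofs
def stepInit (data : List Int) (st : List (List Int)) (i : Nat) : List (List Int) :=
  st.set i ((st.getD i []).set 0 (data.getD i 0))

def stepCell (j : Nat) (st : List (List Int)) (i : Nat) : List (List Int) :=
  st.set i ((st.getD i []).set j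
    (pyGcd ((st.getD i []).getD (j - 1) 0) ((st.getD (i + 2 ^ (j - 1)) []).getD (j - 1) 0)))

def stepLevel (n : Nat) (st : List (List Int)) (j : Nat) : List (List Int) :=
  (List.range (n + 1 - 2 ^ j)).foldl (stepCell j) st

theorem buildSt_eq (nums : List Int) :
    buildSt nums = (List.range' 1 (Nat.log2 nums.length + 1 - 1)).foldl
      (stepLevel nums.length)
      ((List.range nums.length).foldl (stepInit nums)
        (List.replicate nums.length (List.replicate (Nat.log2 nums.length + 1) 0))) := by
  have hk : (buildLog nums.length).getD nums.length 0 = Nat.log2 nums.length :=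
    (buildLog_spec nums.length).2 nums.length le_rfl
  simp only [buildSt, hk]
  rfl

-- shape invariant
def StShape (nums : List Int) (st : List (List Int)) : Prop :=
  st.length = nums.length ∧
  ∀ i < nums.length, ((st.getD i []).length = Nat.log2 nums.length + 1)

-- levels 0..J are filled with their intended values
def StOK (nums : List Int) (st : List (List Int)) (J : Nat) : Prop :=
  StShape nums st ∧
  ∀ j ≤ J, ∀ i, i + 2 ^ j ≤ nums.length → (st.getD i []).getD j 0 = target nums i j

theorem target_rec (nums : List Int) (i j : Nat) (hj : 1 ≤ j)
    (hn : i + 2 ^ j ≤ nums.length) :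
    pyGcd (target nums i (j - 1)) (target nums (i + 2 ^ (j - 1)) (j - 1)) = target nums i j := by
  have hpow : 2 ^ (j - 1) + 2 ^ (j - 1) = 2 ^ j := two_pow_pred hj
  have hp1 : 0 < 2 ^ (j - 1) := Nat.two_pow_pos _
  have hglue : Nat.gcd (seg nums i (2 ^ (j - 1))) (seg nums (i + 2 ^ (j - 1)) (2 ^ (j - 1)))
      = seg nums i (2 ^ j) :=
    seg_glue (by omega) (by omega) (by omega) (by omega) (by omega)
  by_cases h1 : j = 1
  · subst h1
    have e1 : seg nums i 1 = (nums.getD i 0).natAbs := seg_one (by omega)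
    have e2 : seg nums (i + 1) 1 = (nums.getD (i + 1) 0).natAbs := seg_one (by omega)
    simp only [target, Nat.sub_self, pow_zero, pow_one, reduceIte] at hglue ⊢
    rw [pyGcd_def, ← e1, ← e2, hglue]
    norm_num
  · have hj2 : j - 1 ≠ 0 := by omega
    simp only [target, if_neg hj2, if_neg (by omega : j ≠ 0)]
    rw [pyGcd_natCast, hglue]

theorem st1_inv (nums : List Int) : ∀ m ≤ nums.length,
    StShape nums ((List.range m).foldl (stepInit nums)
      (List.replicate nums.length (List.replicate (Nat.log2 nums.length + 1) 0))) ∧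
    ∀ i < m, (((List.range m).foldl (stepInit nums)
      (List.replicate nums.length (List.replicate (Nat.log2 nums.length + 1) 0))).getD i []).getD 0 0
        = nums.getD i 0 := by
  intro m
  induction m with
  | zero =>
    intro _
    refine ⟨⟨by simp, ?_⟩, by omega⟩
    intro i hi
    simp [List.getD, hi]
  | succ m ih =>
    intro hm
    obtain ⟨⟨hL, hrow⟩, hcell⟩ := ih (by omega)
    rw [List.range_succ, List.foldl_append, List.foldl_cons, List.foldl_nil]
    have hmlen : m < (((List.range m).foldl (stepInit nums)
        (List.replicate nums.length (List.replicate (Nat.log2 nums.length + 1) 0)))).length := by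
      omega
    refine ⟨⟨by simp [stepInit, hL], ?_⟩, ?_⟩
    · intro i hi
      by_cases him : i = m
      · subst him
        rw [stepInit, getD_set_self _ _ _ _ hmlen, List.length_set]
        exact hrow i hi
      · rw [stepInit, getD_set_ne _ _ _ (fun he => him he.symm)]
        exact hrow i hi
    · intro i hi
      by_cases him : i = m
      · subst him
        rw [stepInit, getD_set_self _ _ _ _ hmlen,
            getD_set_self _ _ _ _ (by rw [hrow i (by omega)]; omega)]
      · rw [stepInit, getD_set_ne _ _ _ (fun he => him he.symm)]
        exact hcell i (by omega)

theorem stLevel_inv (nums : List Int) (j : Nat) (hj1 : 1 ≤ j)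
    (hjk : j ≤ Nat.log2 nums.length) (st : List (List Int))
    (h : StOK nums st (j - 1)) : ∀ m ≤ nums.length + 1 - 2 ^ j,
    StOK nums ((List.range m).foldl (stepCell j) st) (j - 1) ∧
    ∀ i < m, (((List.range m).foldl (stepCell j) st).getD i []).getD j 0 = target nums i j := by
  intro m
  induction m with
  | zero => intro _; exact ⟨h, by omega⟩
  | succ m ih =>
    intro hm
    have hp2 : 0 < 2 ^ j := Nat.two_pow_pos _
    obtain ⟨⟨⟨hL, hrow⟩, hold⟩, hnew⟩ := ih (by omega)
    rw [List.range_succ, List.foldl_append, List.foldl_cons, List.foldl_nil]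
    set st' := (List.range m).foldl (stepCell j) st with hst'
    have hmlen : m < st'.length := by omega
    have hjlen : j < (st'.getD m []).length := by rw [hrow m (by omega)]; omega
    have hval : pyGcd ((st'.getD m []).getD (j - 1) 0) ((st'.getD (m + 2 ^ (j - 1)) []).getD (j - 1) 0)
        = target nums m j := by
      have hpow : 2 ^ (j - 1) + 2 ^ (j - 1) = 2 ^ j := two_pow_pred hj1
      have hp1 : 0 < 2 ^ (j - 1) := Nat.two_pow_pos _
      rw [hold (j - 1) le_rfl m (by omega), hold (j - 1) le_rfl (m + 2 ^ (j - 1)) (by omega)]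
      exact target_rec nums m j hj1 (by omega)
    refine ⟨⟨⟨by simp [stepCell, hL], ?_⟩, ?_⟩, ?_⟩
    · intro i hi
      by_cases him : i = m
      · subst him
        rw [stepCell, getD_set_self _ _ _ _ hmlen, List.length_set]
        exact hrow i hi
      · rw [stepCell, getD_set_ne _ _ _ (fun he => him he.symm)]
        exact hrow i hi
    · intro j' hj' i hi
      by_cases him : i = m
      · subst him
        rw [stepCell, getD_set_self _ _ _ _ hmlen,
            getD_set_ne _ _ _ (by omega : j ≠ j')]
        exact hold j' hj' i hi
      · rw [stepCell, getD_set_ne _ _ _ (fun he => him he.symm)]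
        exact hold j' hj' i hi
    · intro i hi
      by_cases him : i = m
      · subst him
        rw [stepCell, getD_set_self _ _ _ _ hmlen, getD_set_self _ _ _ _ hjlen]
        exact hval
      · rw [stepCell, getD_set_ne _ _ _ (fun he => him he.symm)]
        exact hnew i (by omega)

theorem stOuter (nums : List Int) : ∀ J ≤ Nat.log2 nums.length,
    StOK nums ((List.range' 1 J).foldl (stepLevel nums.length)
      ((List.range nums.length).foldl (stepInit nums)
        (List.replicate nums.length (List.replicate (Nat.log2 nums.length + 1) 0)))) J := by
  intro J
  induction J with
  | zero =>
    intro _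
    obtain ⟨hsh, hcell⟩ := st1_inv nums nums.length le_rfl
    refine ⟨hsh, ?_⟩
    intro j hj i hi
    have hj0 : j = 0 := by omega
    subst hj0
    rw [target, if_pos rfl]
    exact hcell i (by simpa using hi)
  | succ J ih =>
    intro hJ
    rw [List.range'_1_concat, List.foldl_append, List.foldl_cons, List.foldl_nil]
    have hok := ih (by omega)
    set st := (List.range' 1 J).foldl (stepLevel nums.length)
      ((List.range nums.length).foldl (stepInit nums)
        (List.replicate nums.length (List.replicate (Nat.log2 nums.length + 1) 0))) with hst
    have h0 : StOK nums st (1 + J - 1) := by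
      rw [show 1 + J - 1 = J by omega]; exact hok
    obtain ⟨hsok, hcells⟩ := stLevel_inv nums (1 + J) (by omega) (by omega) st h0
      (nums.length + 1 - 2 ^ (1 + J)) le_rfl
    have hp2 : 0 < 2 ^ (1 + J) := Nat.two_pow_pos _
    refine ⟨hsok.1, ?_⟩
    intro j hj i hi
    by_cases hjJ : j ≤ 1 + J - 1
    · exact hsok.2 j hjJ i hi
    · have hje : j = 1 + J := by omega
      subst hje
      exact hcells i (by omega)

theorem buildSt_spec (nums : List Int) :
    ((buildSt nums).length = nums.length) ∧
    (∀ i < nums.length, ((buildSt nums).getD i []).getD 0 0 = nums.getD i 0) ∧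
    (∀ j i, 1 ≤ j → j ≤ Nat.log2 nums.length → i + 2 ^ j ≤ nums.length →
      ((buildSt nums).getD i []).getD j 0 = (seg nums i (2 ^ j) : Int)) := by
  rw [buildSt_eq]
  have h := stOuter nums (Nat.log2 nums.length) le_rfl
  obtain ⟨⟨hL, _⟩, hcell⟩ := h
  simp only [Nat.add_sub_cancel] at *
  refine ⟨hL, ?_, ?_⟩
  · intro i hi
    have := hcell 0 (by omega) i (by simpa using hi)
    rwa [target, if_pos rfl] at this
  · intro j i hj hjk hi
    have := hcell j hjk i hi
    rwa [target, if_neg (by omega)] at this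

theorem queryA_eq (nums : List Int) (l r : Nat) (hlr : l ≤ r) (hr : r < nums.length) :
    queryA (buildLog nums.length) (buildSt nums) (l : Int) (r : Int)
      = (seg nums l (r - l + 1) : Int) := by
  have hn0 : nums.length ≠ 0 := by omega
  have e0 : ((r : Int) - (l : Int) + 1).toNat = r - l + 1 := by omega
  have hlen : r - l + 1 ≤ nums.length := by omega
  have hlog : (buildLog nums.length).getD (r - l + 1) 0 = Nat.log2 (r - l + 1) :=
    (buildLog_spec nums.length).2 _ hlen
  simp only [queryA, e0, hlog]
  set j := Nat.log2 (r - l + 1) with hj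
  have hlow : 2 ^ j ≤ r - l + 1 := Nat.log2_self_le (by omega)
  have hhigh : r - l + 1 < 2 ^ (j + 1) := Nat.lt_log2_self
  have hpow : 2 ^ j + 2 ^ j = 2 ^ (j + 1) := by
    have := two_pow_pred (show 1 ≤ j + 1 by omega)
    simpa using this
  have hp1 : 0 < 2 ^ j := Nat.two_pow_pos _
  have el : ((l : Int)).toNat = l := Int.toNat_natCast l
  have er : ((r : Int) - ((2 ^ j : Nat) : Int) + 1).toNat = r + 1 - 2 ^ j := by omega
  rw [el, er]
  by_cases hj0 : j = 0
  · have hrl : r = l := by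
      have : r - l + 1 < 2 := by rw [← pow_one 2, hj0] at hhigh; simpa using hhigh
      omega
    subst hrl
    simp only [hj0, pow_zero]
    rw [show r + 1 - 1 = r from by omega]
    rw [(buildSt_spec nums).2.1 r (by omega)]
    rw [pyGcd_def, Nat.gcd_self]
    rw [show r - r + 1 = 1 from by omega, seg_one (by omega)]
  · have hjn : j ≤ Nat.log2 nums.length := by
      rw [Nat.le_log2 hn0]; omega
    have hc1 := (buildSt_spec nums).2.2 j l (by omega) hjn (by omega)
    have hc2 := (buildSt_spec nums).2.2 j (r + 1 - 2 ^ j) (by omega) hjn (by omega)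
    rw [hc1, hc2, pyGcd_natCast]
    rw [seg_glue (by omega) (by omega) (by omega) (by omega) (by omega)]

-- ===== segment-tree characterisation =====

theorem buildB_val_aux (nums : List Int) : ∀ d lo hi, hi - lo = d → lo < hi →
    hi ≤ nums.length → stVal (buildB nums lo hi) = (seg nums lo (hi - lo) : Int) := by
  intro d
  induction d using Nat.strong_induction_on with
  | _ d ih =>
    intro lo hi hd hlo hhi
    rw [buildB]
    by_cases h : hi ≤ lo + 1
    · rw [dif_pos h]
      have he : hi = lo + 1 := by omega
      subst he
      simp only [stVal_leaf, Nat.add_sub_cancel_left]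
      rw [pyGcd_def, seg_one (by omega)]
      simp
    · rw [dif_neg h]
      simp only [stVal_node]
      have hmid : lo < (lo + hi) / 2 ∧ (lo + hi) / 2 < hi := by omega
      rw [ih ((lo + hi) / 2 - lo) (by omega) lo ((lo + hi) / 2) rfl (by omega) (by omega),
          ih (hi - (lo + hi) / 2) (by omega) ((lo + hi) / 2) hi rfl (by omega) (by omega),
          pyGcd_natCast]
      rw [seg_glue (len := hi - lo) (by omega) (by omega) (by omega) (by omega) (by omega)]

theorem buildB_val (nums : List Int) (lo hi : Nat) (hlo : lo < hi) (hhi : hi ≤ nums.length) :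
    stVal (buildB nums lo hi) = (seg nums lo (hi - lo) : Int) :=
  buildB_val_aux nums (hi - lo) lo hi rfl hlo hhi

theorem queryB_eq (nums : List Int) (lo hi l r : Nat) (h1 : lo ≤ l) (h2 : l < r)
    (h3 : r ≤ hi) (hhi : hi ≤ nums.length) :
    queryB (buildB nums lo hi) lo hi l r = (seg nums l (r - l) : Int) := by
  induction hd : hi - lo using Nat.strong_induction_on generalizing lo hi l r with
  | _ d ih =>
    rw [queryB.eq_def]
    by_cases hfull : l ≤ lo ∧ hi ≤ r
    · rw [if_pos hfull]
      have hl : l = lo := by omega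
      have hr : r = hi := by omega
      subst hl; subst hr
      exact buildB_val nums l r (by omega) hhi
    · rw [if_neg hfull]
      rw [buildB]
      by_cases hle : hi ≤ lo + 1
      · omega
      · rw [dif_neg hle]
        show (if r ≤ (lo + hi) / 2 then queryB (buildB nums lo ((lo + hi) / 2)) lo ((lo + hi) / 2) l r
          else if (lo + hi) / 2 ≤ l then queryB (buildB nums ((lo + hi) / 2) hi) ((lo + hi) / 2) hi l r
          else pyGcd (queryB (buildB nums lo ((lo + hi) / 2)) lo ((lo + hi) / 2) l ((lo + hi) / 2))
            (queryB (buildB nums ((lo + hi) / 2) hi) ((lo + hi) / 2) hi ((lo + hi) / 2) r)) = ((seg nums l (r - l) : Nat) : Int)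
        have hmid : lo < (lo + hi) / 2 ∧ (lo + hi) / 2 < hi := by omega
        by_cases hrm : r ≤ (lo + hi) / 2
        · rw [if_pos hrm]
          exact ih ((lo + hi) / 2 - lo) (by omega) lo ((lo + hi) / 2) l r h1 h2 hrm (by omega) rfl
        · by_cases hlm : (lo + hi) / 2 ≤ l
          · rw [if_neg hrm, if_pos hlm]
            exact ih (hi - (lo + hi) / 2) (by omega) ((lo + hi) / 2) hi l r hlm h2 h3 hhi rfl
          · rw [if_neg hrm, if_neg hlm]
            rw [ih ((lo + hi) / 2 - lo) (by omega) lo ((lo + hi) / 2) l ((lo + hi) / 2) h1 (by omega) le_rfl (by omega) rfl,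
                ih (hi - (lo + hi) / 2) (by omega) ((lo + hi) / 2) hi ((lo + hi) / 2) r le_rfl (by omega) h3 hhi rfl,
                pyGcd_natCast]
            rw [seg_glue (len := r - l) (by omega) (by omega) (by omega) (by omega) (by omega)]

-- ===== loop equivalence =====

theorem loop_eq (nums : List Int) (maxC : Int) (midN : Nat)
    (j k p : Int) (hp : 0 ≤ p) :
    loopA (buildLog nums.length) (buildSt nums) (nums.length : Int) (midN : Int) maxC j k p
      = loopB (buildB nums 0 nums.length) nums.length midN maxC
          (max j (p + midN)).toNat k := by
  induction hd : ((nums.length : Int) - j).toNat using Nat.strong_induction_on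
    generalizing j k p with
  | _ d ih =>
    by_cases hskip : j < p + (midN : Int)
    · rw [max_eq_right (le_of_lt hskip)]
      by_cases hnj : (nums.length : Int) ≤ j
      · rw [loopA, dif_pos hnj, loopB, dif_neg (by omega)]
      · rw [loopA, dif_neg hnj, if_pos (by omega)]
        rw [ih (((nums.length : Int) - (j + 1)).toNat) (by omega) (j + 1) k p hp rfl]
        rw [max_eq_right (by omega)]
    · rw [not_lt] at hskip
      rw [max_eq_left (by omega)]
      by_cases hnj : (nums.length : Int) ≤ j
      · rw [loopA, dif_pos hnj, loopB, dif_neg (by omega)]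
      · have hj0 : 0 ≤ j := by omega
        obtain ⟨jN, rfl⟩ : ∃ jN : Nat, j = ((jN : Nat) : Int) := ⟨j.toNat, by omega⟩
        have hjn : jN < nums.length := by omega
        have hmle : midN ≤ jN := by omega
        rw [Int.toNat_natCast]
        rw [loopA, dif_neg hnj, if_neg (by omega)]
        simp only []
        rw [max_eq_right (show p ≤ ((jN : Nat) : Int) - (midN : Int) by omega)]
        have hq : queryA (buildLog nums.length) (buildSt nums) (((jN : Nat) : Int) - (midN : Int))
            ((jN : Nat) : Int) = ((seg nums (jN - midN) (midN + 1) : Nat) : Int) := by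
          rw [show (((jN : Nat) : Int) - (midN : Int)) = ((jN - midN : Nat) : Int) by omega]
          rw [queryA_eq nums (jN - midN) jN (by omega) hjn]
          rw [show jN - (jN - midN) + 1 = midN + 1 by omega]
        have hqB : queryB (buildB nums 0 nums.length) 0 nums.length (jN - midN) (jN + 1)
            = ((seg nums (jN - midN) (midN + 1) : Nat) : Int) := by
          rw [queryB_eq nums 0 nums.length (jN - midN) (jN + 1) (by omega) (by omega)
            (by omega) le_rfl]
          rw [show jN + 1 - (jN - midN) = midN + 1 by omega]
        rw [loopB, dif_pos hjn, hq, hqB]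
        by_cases hg : ((seg nums (jN - midN) (midN + 1) : Nat) : Int) ≥ 2
        · rw [if_pos hg, if_pos hg]
          by_cases hk : k + 1 > maxC
          · rw [if_pos hk, if_pos hk]
          · rw [if_neg hk, if_neg hk]
            rw [ih (((nums.length : Int) - (((jN : Nat) : Int) + 1)).toNat) (by omega)
              (((jN : Nat) : Int) + 1) (k + 1) (((jN : Nat) : Int) + 1) (by omega) rfl]
            rw [max_eq_right (by omega)]
            rw [show (((jN : Nat) : Int) + 1 + (midN : Int)).toNat = jN + midN + 1 by omega]
        · rw [if_neg hg, if_neg hg]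
          rw [ih (((nums.length : Int) - (((jN : Nat) : Int) + 1)).toNat) (by omega)
            (((jN : Nat) : Int) + 1) k (((jN : Nat) : Int) - (midN : Int)) (by omega) rfl]
          rw [show ((jN : Nat) : Int) - (midN : Int) + (midN : Int) = ((jN : Nat) : Int) by omega]
          rw [max_eq_left (by omega)]
          rw [show (((jN : Nat) : Int) + 1).toNat = jN + 1 by omega]

theorem bs_eq (nums : List Int) (maxC : Int) (left right ans : Int) (hl : 0 ≤ left) :
    bsA (buildLog nums.length) (buildSt nums) (nums.length : Int) maxC left right ans
      = bsB (buildB nums 0 nums.length) nums.length maxC left right ans := by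
  induction hd : (right + 1 - left).toNat using Nat.strong_induction_on
    generalizing left right ans with
  | _ d ih =>
    by_cases hrl : right < left
    · rw [bsA, dif_pos hrl, bsB, dif_pos hrl]
    · have hb := PySem.Int.floordiv_two_mid_bounds (show left ≤ right by omega)
      rw [bsA, dif_neg hrl, bsB, dif_neg hrl]
      simp only []
      set M := PySem.Int.floordiv (left + right) 2 with hM
      have hM0 : 0 ≤ M := by omega
      have hMe : M = ((M.toNat : Nat) : Int) := by omega
      have hloop : loopA (buildLog nums.length) (buildSt nums) (nums.length : Int) M maxC M 0 0
          = loopB (buildB nums 0 nums.length) nums.length M.toNat maxC M.toNat 0 := by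
        rw [hMe, loop_eq nums maxC M.toNat ((M.toNat : Nat) : Int) 0 0 le_rfl]
        rw [show ((0 : Int) + ((M.toNat : Nat) : Int)) = ((M.toNat : Nat) : Int) by omega]
        rw [max_self, Int.toNat_natCast]
      rw [hloop]
      by_cases hk : loopB (buildB nums 0 nums.length) nums.length M.toNat maxC M.toNat 0 ≤ maxC
      · rw [if_pos hk, if_pos hk]
        exact ih ((M - 1) + 1 - left).toNat (by omega) left (M - 1) M hl rfl
      · rw [if_neg hk, if_neg hk]
        exact ih (right + 1 - (M + 1)).toNat (by omega) (M + 1) right ans (by omega) rfl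

-- ===== VERDICT (by name: the statement is the Claim_ definition above) =====
theorem minStable_spec : Claim_equal_minStable := by
  intro nums maxC _
  unfold Spec_minStable minStable minStable_alt
  by_cases h0 : nums.length = 0
  · simp only [h0, Nat.cast_zero, if_pos]
    rw [bsA]
    norm_num
  · simp only [if_neg h0]
    exact bs_eq nums maxC 0 ((nums.length : Int) - 1) (nums.length : Int) le_rfl
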